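-- pv_equiv track=rewrite | github.com/RamanSB/violet-cache | app/services/email_ingestion/filters/rules.py | _has_any_header
-- ===== SOURCE A (Python) =====
-- from typing import Any, Dict, Iterable, Optional, Tuple
--
-- def _has_any_header(headers: Dict[str, str], names: Iterable[str]) -> bool:
--     for n in names:
--         n_l = n.lower()
--         if n_l in headers:
--             # special case: precedence exists but isn't bulk/list (still often noisy)
--             if n_l == "precedence":
--                 v = headers.get("precedence", "").lower()
--                 if "bulk" in v or "list" in v or "junk" in v:
--                     return True
--                 # if precedence exists with something else, don't auto-drop
--                 continue
--             return True
--     return False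
-- ===== SOURCE B (Python) =====
-- def _has_any_header(headers, names):
--     wanted = {n.lower() for n in names}
--     for k, v in headers.items():
--         if k in wanted:
--             if k != "precedence":
--                 return True
--             lv = v.lower()
--             if "bulk" in lv or "list" in lv or "junk" in lv:
--                 return True
--     return False
-- ===== Notes on version B (the rewrite author's own statement) =====
-- stated objective: alternative
-- what changed: Inverts the traversal: instead of A's loop over the requested names probing the dict with a continue branch, B builds the lowered-name set once and scans the header items themselves, testing each key against the set and checking the precedence value in place.
import Mathlib
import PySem

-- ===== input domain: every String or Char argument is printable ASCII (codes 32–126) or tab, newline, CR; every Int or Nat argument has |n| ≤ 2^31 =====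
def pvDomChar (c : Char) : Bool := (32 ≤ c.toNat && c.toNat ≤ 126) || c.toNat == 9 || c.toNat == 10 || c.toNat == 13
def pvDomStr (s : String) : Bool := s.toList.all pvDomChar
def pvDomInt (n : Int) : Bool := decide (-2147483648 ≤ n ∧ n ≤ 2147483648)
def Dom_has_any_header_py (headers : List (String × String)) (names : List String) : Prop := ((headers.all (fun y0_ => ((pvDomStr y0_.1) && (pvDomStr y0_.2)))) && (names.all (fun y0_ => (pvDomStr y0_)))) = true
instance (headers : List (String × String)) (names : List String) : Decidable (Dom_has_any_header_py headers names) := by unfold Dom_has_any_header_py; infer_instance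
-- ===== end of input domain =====

-- B inverts the traversal: it builds the lowered-name set once and scans the header ITEMS, instead of A's loop over the names probing the dict (objective: alternative decomposition, same result).

-- ===== PORT A =====
-- literal transliteration of A's for-loop over names with its continue (recursion on names)
def has_any_header_py (headers : List (String × String)) (names : List String) : Bool :=
  match names with
  | [] => false
  | n :: rest =>
    let n_l := PySem.Str.lower n
    if (PySem.Dict.mk headers).contains n_l then
      if n_l == "precedence" then
        let v := PySem.Str.lower ((PySem.Dict.mk headers).getD "precedence" "")
        if PySem.Str.isIn "bulk" v || PySem.Str.isIn "list" v || PySem.Str.isIn "junk" v then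
          true
        else
          has_any_header_py headers rest   -- 'continue'
      else true
    else has_any_header_py headers rest

-- ===== PORT B =====
-- Source B's loop 'for k, v in headers.items()' as recursion over the dict's item list
def pvScanItems (wanted : PySem.Set String) (items : List (String × String)) : Bool :=
  match items with
  | [] => false
  | (k, v) :: rest =>
    if wanted.contains k then
      if k != "precedence" then true
      else
        let lv := PySem.Str.lower v
        if PySem.Str.isIn "bulk" lv || PySem.Str.isIn "list" lv || PySem.Str.isIn "junk" lv then
          true
        else pvScanItems wanted rest
    else pvScanItems wanted rest

def has_any_header_py_alt (headers : List (String × String)) (names : List String) : Bool :=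
  let wanted : PySem.Set String := PySem.Set.ofList (names.map PySem.Str.lower)
  pvScanItems wanted (PySem.Dict.mk headers).items

-- ===== PRECONDITION & SPEC =====
-- Pre_ excludes association lists with duplicate keys: a Python dict cannot carry them
-- (they collapse before either function runs), so the Lean-level duplicates represent no Python input.
def Pre_has_any_header_py (headers : List (String × String)) (names : List String) : Prop :=
  (headers.map Prod.fst).Nodup
instance (headers : List (String × String)) (names : List String) : Decidable (Pre_has_any_header_py headers names) := by unfold Pre_has_any_header_py; infer_instance

def pvWitness_has_any_header_py : (List (String × String)) × List String :=
  ([("precedence", "bulk mail"), ("x-spam", "yes")], ["Precedence", "X-Foo"])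

def Spec_has_any_header_py (headers : List (String × String)) (names : List String) (out : Bool) : Prop := out = has_any_header_py_alt headers names
instance (headers : List (String × String)) (names : List String) (out : Bool) : Decidable (Spec_has_any_header_py headers names out) := by unfold Spec_has_any_header_py; infer_instance

-- ===== CLAIM (what is proved, stated in full; the proofs are below) =====
def Claim_equal_has_any_header_py : Prop := ∀ (headers : List (String × String)) (names : List String), Dom_has_any_header_py headers names → Pre_has_any_header_py headers names → Spec_has_any_header_py headers names (has_any_header_py headers names)

-- ===== LEMMAS AND PROOFS =====

-- the common characterisation both sides reduce to
def pvHit (headers : List (String × String)) (n : String) : Bool :=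
  (PySem.Dict.mk headers).contains (PySem.Str.lower n) && !(PySem.Str.lower n == "precedence")

def pvPrecTest (headers : List (String × String)) : Bool :=
  let v := PySem.Str.lower ((PySem.Dict.mk headers).getD "precedence" "")
  PySem.Str.isIn "bulk" v || PySem.Str.isIn "list" v || PySem.Str.isIn "junk" v

def pvValTest (v : String) : Bool :=
  let lv := PySem.Str.lower v
  PySem.Str.isIn "bulk" lv || PySem.Str.isIn "list" lv || PySem.Str.isIn "junk" lv

lemma pvPrecTest_def (headers : List (String × String)) :
    (PySem.Str.isIn "bulk" (PySem.Str.lower ((PySem.Dict.mk headers).getD "precedence" "")) ||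
     PySem.Str.isIn "list" (PySem.Str.lower ((PySem.Dict.mk headers).getD "precedence" "")) ||
     PySem.Str.isIn "junk" (PySem.Str.lower ((PySem.Dict.mk headers).getD "precedence" ""))) =
    pvPrecTest headers := rfl

lemma hasA_char (headers : List (String × String)) (names : List String) :
    has_any_header_py headers names =
      (names.any (pvHit headers) ||
        (names.any (fun n => PySem.Str.lower n == "precedence") &&
          (PySem.Dict.mk headers).contains "precedence" && pvPrecTest headers)) := by
  induction names with
  | nil => simp [has_any_header_py]
  | cons n rest ih =>
    simp only [has_any_header_py, List.any_cons, pvHit]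
    rw [pvPrecTest_def]
    by_cases hp : PySem.Str.lower n = "precedence"
    · rw [hp]
      cases hC : (PySem.Dict.mk headers).contains "precedence" <;>
        cases hT : pvPrecTest headers <;>
          simp [hC, hT, ih]
    · have hp' : (PySem.Str.lower n == "precedence") = false := by simpa using hp
      cases hc : (PySem.Dict.mk headers).contains (PySem.Str.lower n) <;>
        simp [hp', ih]

-- the scan over items is an 'any' over the items
lemma pvScanItems_eq_any (wanted : PySem.Set String) (items : List (String × String)) :
    pvScanItems wanted items =
      items.any (fun p => wanted.contains p.1 && (!(p.1 == "precedence") || pvValTest p.2)) := by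
  induction items with
  | nil => simp [pvScanItems]
  | cons p rest ih =>
    obtain ⟨k, v⟩ := p
    by_cases hw : k ∈ wanted
    · have hw' : wanted.contains k = true := (PySem.Set.contains_iff _ _).mpr hw
      by_cases hp : k = "precedence"
      · subst hp
        cases ht : pvValTest v <;>
          simp only [pvValTest, PySem.Str.lower] at ht <;>
          simp [pvScanItems, hw, ih, pvValTest, PySem.Str.lower]
      · simp [pvScanItems, hw, hp]
    · have hw' : wanted.contains k = false := by
        rw [← Bool.not_eq_true, PySem.Set.contains_iff]; exact hw
      simp [pvScanItems, hw, ih]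

lemma wanted_contains (names : List String) (k : String) :
    (PySem.Set.ofList (names.map PySem.Str.lower)).contains k =
      names.any (fun n => PySem.Str.lower n == k) := by
  cases h : names.any (fun n => PySem.Str.lower n == k) with
  | true =>
    rw [PySem.Set.contains_iff, PySem.Set.mem_ofList]
    rw [List.any_eq_true] at h
    obtain ⟨n, hn, he⟩ := h
    exact List.mem_map.mpr ⟨n, hn, by simpa using he⟩
  | false =>
    rw [← Bool.not_eq_true, PySem.Set.contains_iff, PySem.Set.mem_ofList]
    intro hm
    obtain ⟨n, hn, he⟩ := List.mem_map.mp hm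
    rw [List.any_eq_false] at h
    exact absurd (by simpa using he) (by simpa using h n hn)

lemma hasB_char (headers : List (String × String)) (names : List String)
    (hnd : (headers.map Prod.fst).Nodup) :
    has_any_header_py_alt headers names =
      (names.any (pvHit headers) ||
        (names.any (fun n => PySem.Str.lower n == "precedence") &&
          (PySem.Dict.mk headers).contains "precedence" && pvPrecTest headers)) := by
  unfold has_any_header_py_alt
  rw [pvScanItems_eq_any]
  set d := PySem.Dict.mk headers with hd
  have hnodup : d.keys.Nodup := by
    rw [hd, PySem.Dict.keys_mk]; exact hnd
  -- split the item scan into the non-precedence part and the precedence part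
  have hsplit : (d.items.any (fun p =>
        (PySem.Set.ofList (names.map PySem.Str.lower)).contains p.1 &&
          (!(p.1 == "precedence") || pvValTest p.2))) =
      ((d.items.any (fun p =>
        (PySem.Set.ofList (names.map PySem.Str.lower)).contains p.1 && !(p.1 == "precedence"))) ||
       (d.items.any (fun p =>
        (PySem.Set.ofList (names.map PySem.Str.lower)).contains p.1 && (p.1 == "precedence") && pvValTest p.2))) := by
    induction d.items with
    | nil => simp
    | cons p rest ih =>
      simp only [List.any_cons, ih]
      cases hw : (PySem.Set.ofList (names.map PySem.Str.lower)).contains p.1 <;>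
        cases hp : (p.1 == "precedence") <;>
          cases ht : pvValTest p.2 <;> simp
  rw [hsplit]
  congr 1
  · -- non-precedence part equals names.any (pvHit headers)
    cases h : names.any (pvHit headers) with
    | true =>
      rw [List.any_eq_true] at h
      obtain ⟨n, hn, hh⟩ := h
      simp only [pvHit, Bool.and_eq_true, Bool.not_eq_eq_eq_not, Bool.not_true] at hh
      obtain ⟨hc, hne⟩ := hh
      rw [← hd] at hc
      rw [PySem.Dict.contains_eq_isSome_get?] at hc
      cases hg : d.get? (PySem.Str.lower n) with
      | none => rw [hg] at hc; simp at hc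
      | some v =>
        have hm : (PySem.Str.lower n, v) ∈ d.items := PySem.Dict.mem_items_of_get?_eq_some d hg
        rw [List.any_eq_true]
        refine ⟨(PySem.Str.lower n, v), hm, ?_⟩
        simp only [Bool.and_eq_true, Bool.not_eq_eq_eq_not, Bool.not_true]
        refine ⟨?_, hne⟩
        rw [wanted_contains]
        rw [List.any_eq_true]
        exact ⟨n, hn, by simp⟩
    | false =>
      rw [List.any_eq_false] at h
      rw [List.any_eq_false]
      rintro ⟨k, v⟩ hm
      simp only [Bool.and_eq_true, Bool.not_eq_eq_eq_not, Bool.not_true, not_and]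
      intro hw hne
      rw [wanted_contains, List.any_eq_true] at hw
      obtain ⟨n, hn, he⟩ := hw
      have he' : PySem.Str.lower n = k := by simpa using he
      have := h n hn
      simp only [pvHit, Bool.and_eq_true, not_and, Bool.not_eq_eq_eq_not, Bool.not_true] at this
      have hc : d.contains k = true := by
        rw [PySem.Dict.contains_iff_mem_keys]
        exact PySem.Dict.mem_keys_of_mem_items d hm
      rw [he'] at this
      rw [← hd] at this
      exact absurd hne (by simpa using this hc)
  · -- precedence part
    cases hc : d.contains "precedence" with
    | true =>
      rw [PySem.Dict.contains_eq_isSome_get?] at hc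
      cases hg : d.get? "precedence" with
      | none => rw [hg] at hc; simp at hc
      | some v =>
        have hm : ("precedence", v) ∈ d.items := PySem.Dict.mem_items_of_get?_eq_some d hg
        have hv : d.getD "precedence" "" = v := PySem.Dict.getD_of_get?_eq_some d "" hg
        have hpt : pvPrecTest headers = pvValTest v := by
          unfold pvPrecTest pvValTest
          rw [← hd, hv]
        cases hw : names.any (fun n => PySem.Str.lower n == "precedence") with
        | true =>
          rw [hpt]
          simp only [Bool.true_and, Bool.and_true]
          cases ht : pvValTest v with
          | true =>
            rw [List.any_eq_true]
            refine ⟨("precedence", v), hm, ?_⟩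
            simp only [Bool.and_eq_true]
            exact ⟨⟨by rw [wanted_contains, hw], by simp⟩, ht⟩
          | false =>
            rw [List.any_eq_false]
            rintro ⟨k, u⟩ hmu
            simp only [Bool.and_eq_true, not_and]
            rintro ⟨_, hk⟩
            have hk' : k = "precedence" := by simpa using hk
            subst hk'
            have : d.get? "precedence" = some u := PySem.Dict.get?_of_mem_items d hmu hnodup
            rw [hg] at this
            injection this with hvu
            rw [← hvu, ht]
            simp
        | false =>
          simp only [Bool.false_and]
          rw [List.any_eq_false]
          rintro ⟨k, u⟩ hmu
          simp only [Bool.and_eq_true, not_and]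
          rintro ⟨hwk, hk⟩
          have hk' : k = "precedence" := by simpa using hk
          subst hk'
          rw [wanted_contains, hw] at hwk
          simp at hwk
    | false =>
      simp only [Bool.and_false, Bool.false_and]
      rw [List.any_eq_false]
      rintro ⟨k, u⟩ hmu
      simp only [Bool.and_eq_true, not_and]
      rintro ⟨_, hk⟩
      have hk' : k = "precedence" := by simpa using hk
      subst hk'
      have : d.contains "precedence" = true := by
        rw [PySem.Dict.contains_iff_mem_keys]
        exact PySem.Dict.mem_keys_of_mem_items d hmu
      rw [hc] at this
      exact absurd this (by simp)

-- ===== VERDICT (by name: the statement is the Claim_ definition above) =====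
theorem has_any_header_py_spec : Claim_equal_has_any_header_py := by
  intro headers names _ hpre
  unfold Spec_has_any_header_py
  rw [hasA_char, hasB_char headers names hpre]
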